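-- pv_equiv track=rewrite | github.com/mrinshad/Artify-Image-to-ASCII-Converter | main.py | resize_ascii
-- ===== SOURCE A (Python) =====
-- def resize_ascii(ascii_art, scale_factor=0.5):
--     """
--     Scale down the ASCII art by a certain factor.
--     """
--     lines = ascii_art.split('\n')
--     scaled_ascii = ''
--     for line in lines:
--         scaled_line = ''
--         for char in line:
--             scaled_line += char * int(scale_factor)
--         scaled_ascii += scaled_line + '\n'
--     return scaled_ascii
-- ===== SOURCE B (Python) =====
-- def resize_ascii(ascii_art, scale_factor=0.5):
--     k = int(scale_factor)
--     return ''.join('\n' if c == '\n' else c * k for c in ascii_art) + '\n'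
-- ===== Notes on version B (the rewrite author's own statement) =====
-- stated objective: simpler
-- what changed: Replaces split-into-lines plus nested per-line/per-char loops building via repeated string concatenation with a single flat pass over the whole string joined once (newlines passed through, other chars repeated k times, one trailing newline).
import Mathlib
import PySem

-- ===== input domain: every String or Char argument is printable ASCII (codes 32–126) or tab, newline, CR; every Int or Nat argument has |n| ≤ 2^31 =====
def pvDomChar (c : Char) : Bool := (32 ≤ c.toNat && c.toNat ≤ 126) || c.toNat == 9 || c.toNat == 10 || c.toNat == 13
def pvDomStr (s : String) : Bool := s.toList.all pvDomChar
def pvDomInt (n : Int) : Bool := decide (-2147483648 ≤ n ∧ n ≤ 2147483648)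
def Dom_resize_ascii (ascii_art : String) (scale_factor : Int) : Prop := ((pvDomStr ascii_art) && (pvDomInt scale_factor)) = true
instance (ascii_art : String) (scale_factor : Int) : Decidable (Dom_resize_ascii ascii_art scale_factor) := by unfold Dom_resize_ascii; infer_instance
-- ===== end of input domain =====

-- B replaces A's split-into-lines + nested loops with one flat pass over the string; objective: simpler.

-- ===== PORT A =====
-- lines = ascii_art.split('\n'); nested loops; char * int(scale_factor) is
-- List.replicate scale_factor.toNat (Python repeats 0 times for k ≤ 0).
def resize_ascii (ascii_art : String) (scale_factor : Int) : String :=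
  let lines := PySem.Chars.splitOn ascii_art.toList ['\n']
  let scaled_ascii := lines.foldl (fun scaled_ascii line =>
    scaled_ascii ++
      (line.foldl (fun scaled_line c => scaled_line ++ List.replicate scale_factor.toNat c) [])
      ++ ['\n']) []
  String.ofList scaled_ascii

-- ===== PORT B =====
-- one pass: ''.join('\n' if c == '\n' else c * k for c in ascii_art) + '\n'
def resize_ascii_alt (ascii_art : String) (scale_factor : Int) : String :=
  let k := scale_factor.toNat
  String.ofList
    (ascii_art.toList.flatMap (fun c => if c = '\n' then ['\n'] else List.replicate k c)
      ++ ['\n'])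

-- ===== PRECONDITION & SPEC =====
def Spec_resize_ascii (ascii_art : String) (scale_factor : Int) (out : String) : Prop := out = resize_ascii_alt ascii_art scale_factor
instance (ascii_art : String) (scale_factor : Int) (out : String) : Decidable (Spec_resize_ascii ascii_art scale_factor out) := by unfold Spec_resize_ascii; infer_instance

-- ===== CLAIM (what is proved, stated in full; the proofs are below) =====
def Claim_equal_resize_ascii : Prop := ∀ (ascii_art : String) (scale_factor : Int), Dom_resize_ascii ascii_art scale_factor → Spec_resize_ascii ascii_art scale_factor (resize_ascii ascii_art scale_factor)

-- ===== LEMMAS AND PROOFS =====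

-- A's outer loop, applied to a list of lines.
def pvLinesOut (g : Char → List Char) (lines : List (List Char)) : List Char :=
  lines.flatMap (fun line => line.flatMap g ++ ['\n'])

theorem pv_go_spec (g : Char → List Char) :
    ∀ (l : List Char) (fuel : Nat) (cur : List Char) (acc : List (List Char)),
      l.length ≤ fuel →
      pvLinesOut g (PySem.Chars.splitOn.go ['\n'] fuel l cur acc)
        = pvLinesOut g acc.reverse ++ cur.reverse.flatMap g
            ++ l.flatMap (fun c => if c = '\n' then ['\n'] else g c) ++ ['\n'] := by
  intro l
  induction l with
  | nil =>
      intro fuel cur acc _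
      cases fuel <;>
        simp [PySem.Chars.splitOn.go, pvLinesOut]
  | cons c rest ih =>
      intro fuel cur acc hle
      cases fuel with
      | zero => simp at hle
      | succ fuel' =>
        simp only [PySem.Chars.splitOn.go]
        by_cases hc : c = '\n'
        · have hpre : List.isPrefixOf ['\n'] (c :: rest) = true := by
            simp [List.isPrefixOf, hc]
          rw [if_pos hpre]
          have := ih fuel' [] (cur.reverse :: acc) (by simpa using Nat.le_of_succ_le_succ hle)
          simpa [pvLinesOut, hc] using this
        · have hpre : List.isPrefixOf ['\n'] (c :: rest) = false := by
            simp [List.isPrefixOf]; exact fun h => absurd h.symm hc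
          rw [if_neg (by simp [hpre])]
          have := ih fuel' (c :: cur) acc (by simpa using Nat.le_of_succ_le_succ hle)
          simpa [pvLinesOut, hc] using this

theorem pv_main (cs : List Char) (g : Char → List Char) :
    pvLinesOut g (PySem.Chars.splitOn cs ['\n'])
      = cs.flatMap (fun c => if c = '\n' then ['\n'] else g c) ++ ['\n'] := by
  have := pv_go_spec g cs (cs.length + 1) [] [] (Nat.le_succ _)
  simpa [PySem.Chars.splitOn, pvLinesOut] using this

-- ===== VERDICT (by name: the statement is the Claim_ definition above) =====
theorem resize_ascii_spec : Claim_equal_resize_ascii := by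
  intro ascii_art scale_factor _
  unfold Spec_resize_ascii resize_ascii resize_ascii_alt
  refine congrArg String.ofList ?_
  have inner : ∀ line : List Char,
      line.foldl (fun scaled_line c => scaled_line ++ List.replicate scale_factor.toNat c) []
        = line.flatMap (fun c => List.replicate scale_factor.toNat c) := by
    intro line
    simpa using PySem.List.foldl_append_eq_flatMap
      (fun c => List.replicate scale_factor.toNat c) line []
  have outer :
      (PySem.Chars.splitOn ascii_art.toList ['\n']).foldl
        (fun scaled_ascii line =>
          scaled_ascii ++
            (line.foldl (fun scaled_line c => scaled_line ++ List.replicate scale_factor.toNat c) [])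
            ++ ['\n']) []
        = pvLinesOut (fun c => List.replicate scale_factor.toNat c)
            (PySem.Chars.splitOn ascii_art.toList ['\n']) := by
    simp only [inner, List.append_assoc]
    simpa [pvLinesOut] using PySem.List.foldl_append_eq_flatMap
      (fun line => line.flatMap (fun c => List.replicate scale_factor.toNat c) ++ ['\n'])
      (PySem.Chars.splitOn ascii_art.toList ['\n']) []
  simp only [outer, pv_main]
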